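-- pv_equiv track=rewrite | github.com/j-walz/Stage2 | generate_html.py.py | get_concept_by_number
-- ===== SOURCE A (Python) =====
-- def get_concept_by_number(text, concept_number):
--     count = 0
--     while count < concept_number:
--         count +=1
--         start = text.find("TITLE")
--         stop = text.find("TITLE", start + 1)
--         if stop >= 0:
--             final_concept = text[start:stop]
--         else:
--             stop = len(text)
--             final_concept = text[start:]
--         text = text[stop:]
--     return final_concept
-- ===== SOURCE B (Python) =====
-- def get_concept_by_number(text, concept_number):
--     if concept_number < 1:
--         raise ValueError("concept_number must be >= 1")
--     start = text.find("TITLE")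
--     k = 1
--     while k < concept_number and start != -1:
--         start = text.find("TITLE", start + 1)
--         k += 1
--     if start == -1:
--         return ""
--     stop = text.find("TITLE", start + 1)
--     return text[start:stop] if stop != -1 else text[start:]
-- ===== Notes on version B (the rewrite author's own statement) =====
-- stated objective: faster
-- what changed: A repeatedly re-slices the remaining text (copying it every iteration) and always runs concept_number iterations; B advances a single index over the intact text with find(start+1), exits as soon as there is no further occurrence, and takes one final slice.
-- intended difference: On nonempty text containing no 'TITLE' with concept_number = 1, A returns the last character of text (an accident of slicing from find's -1), while B returns '' - the intended 'no such concept' answer. — e.g. on get_concept_by_number("x", 1): A returns "x", B returns ""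
import Mathlib
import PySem

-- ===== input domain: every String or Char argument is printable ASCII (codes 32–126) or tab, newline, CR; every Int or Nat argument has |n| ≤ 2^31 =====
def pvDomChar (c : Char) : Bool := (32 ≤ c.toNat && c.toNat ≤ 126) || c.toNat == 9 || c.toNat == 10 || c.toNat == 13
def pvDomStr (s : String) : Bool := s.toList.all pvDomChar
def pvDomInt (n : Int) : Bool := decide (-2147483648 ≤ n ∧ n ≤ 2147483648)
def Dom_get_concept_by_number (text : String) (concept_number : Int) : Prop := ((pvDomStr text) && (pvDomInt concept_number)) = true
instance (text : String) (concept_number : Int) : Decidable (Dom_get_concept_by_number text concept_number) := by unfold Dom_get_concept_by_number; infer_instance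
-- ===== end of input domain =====

-- B replaces A's slice-and-rescan loop (which copies the remaining text every iteration and runs exactly
-- concept_number iterations) by a single advancing index over the intact text with one final slice.

-- ===== PORT A =====
def pvTITLE : List Char := "TITLE".toList

def pvALoop (text : List Char) (final_concept : List Char) : Nat → List Char
  | 0 => final_concept
  | n+1 =>
    let start := PySem.Chars.find text pvTITLE
    let stop := PySem.Chars.findFrom text pvTITLE (start + 1)
    if 0 ≤ stop then
      pvALoop (PySem.Chars.slice text (some stop) none) (PySem.Chars.slice text (some start) (some stop)) n
    else
      pvALoop (PySem.Chars.slice text (some (PySem.Chars.len text)) none) (PySem.Chars.slice text (some start) none) n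

def get_concept_by_number (text : String) (concept_number : Int) : String :=
  String.ofList (pvALoop text.toList [] concept_number.toNat)

-- ===== PORT B =====
-- B's Python raises ValueError on concept_number < 1 (outside Pre_); the port's value there is unconstrained.
def pvBAdvance (text : List Char) (start : Int) : Nat → Int
  | 0 => start
  | f+1 =>
    if start = -1 then start
    else pvBAdvance text (PySem.Chars.findFrom text pvTITLE (start + 1)) f

def get_concept_by_number_alt (text : String) (concept_number : Int) : String :=
  let l := text.toList
  let start := pvBAdvance l (PySem.Chars.find l pvTITLE) (concept_number - 1).toNat
  if start = -1 then ""
  else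
    let stop := PySem.Chars.findFrom l pvTITLE (start + 1)
    if stop ≠ -1 then String.ofList (PySem.Chars.slice l (some start) (some stop))
    else String.ofList (PySem.Chars.slice l (some start) none)

-- ===== PRECONDITION & SPEC =====
-- Pre_ excludes concept_number < 1, on which A raises NameError (the loop body never runs, final_concept unbound).
def Pre_get_concept_by_number (text : String) (concept_number : Int) : Prop := 1 ≤ concept_number
instance (text : String) (concept_number : Int) : Decidable (Pre_get_concept_by_number text concept_number) := by
  unfold Pre_get_concept_by_number; infer_instance

def pvWitness_get_concept_by_number : String × Int := ("aTITLEbTITLEc", 1)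

-- On nonempty text containing no 'TITLE' with concept_number = 1, A returns the LAST CHARACTER of text
-- (an accident of slicing from find's -1), while B returns "" — the intended 'no such concept' answer.
def D_get_concept_by_number (text : String) (concept_number : Int) : Prop :=
  concept_number = 1 ∧ text ≠ "" ∧ PySem.Str.isIn "TITLE" text = false
instance (text : String) (concept_number : Int) : Decidable (D_get_concept_by_number text concept_number) := by
  unfold D_get_concept_by_number; infer_instance

def Spec_get_concept_by_number (text : String) (concept_number : Int) (out : String) : Prop :=
  ¬ D_get_concept_by_number text concept_number → out = get_concept_by_number_alt text concept_number
instance (text : String) (concept_number : Int) (out : String) : Decidable (Spec_get_concept_by_number text concept_number out) := by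
  unfold Spec_get_concept_by_number; infer_instance

def pvDiffWitness_get_concept_by_number : String × Int := ("x", 1)
def pvDiffWitnessOut_get_concept_by_number : String × String := ("x", "")

-- ===== CLAIM (what is proved, stated in full; the proofs are below) =====
def Claim_unchanged_get_concept_by_number : Prop := ∀ (text : String) (concept_number : Int), Dom_get_concept_by_number text concept_number → Pre_get_concept_by_number text concept_number → Spec_get_concept_by_number text concept_number (get_concept_by_number text concept_number)
def Claim_changed_get_concept_by_number : Prop := Dom_get_concept_by_number (pvDiffWitness_get_concept_by_number.1) (pvDiffWitness_get_concept_by_number.2) ∧ Pre_get_concept_by_number (pvDiffWitness_get_concept_by_number.1) (pvDiffWitness_get_concept_by_number.2) ∧ D_get_concept_by_number (pvDiffWitness_get_concept_by_number.1) (pvDiffWitness_get_concept_by_number.2) ∧ get_concept_by_number (pvDiffWitness_get_concept_by_number.1) (pvDiffWitness_get_concept_by_number.2) = pvDiffWitnessOut_get_concept_by_number.1 ∧ get_concept_by_number_alt (pvDiffWitness_get_concept_by_number.1) (pvDiffWitness_get_concept_by_number.2) = pvDiffWitnessOut_get_concept_by_number.2 ∧ pvDiffWitnessOut_get_concept_by_number.1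 ≠ pvDiffWitnessOut_get_concept_by_number.2
def Claim_exact_get_concept_by_number : Prop := ∀ (text : String) (concept_number : Int), Dom_get_concept_by_number text concept_number → Pre_get_concept_by_number text concept_number → D_get_concept_by_number text concept_number → get_concept_by_number text concept_number ≠ get_concept_by_number_alt text concept_number

-- ===== LEMMAS AND PROOFS =====

-- B's code after the while loop, as a List Char function (proof-side only).
def pvBTail (l : List Char) (s : Int) : List Char :=
  if s = -1 then []
  else
    if PySem.Chars.findFrom l pvTITLE (s + 1) ≠ -1
    then PySem.Chars.slice l (some s) (some (PySem.Chars.findFrom l pvTITLE (s + 1)))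
    else PySem.Chars.slice l (some s) none

lemma pv_alt_eq (text : String) (cn : Int) :
    get_concept_by_number_alt text cn =
      String.ofList (pvBTail text.toList (pvBAdvance text.toList (PySem.Chars.find text.toList pvTITLE) (cn - 1).toNat)) := by
  unfold get_concept_by_number_alt pvBTail
  dsimp only
  split_ifs <;> rfl

lemma pvALoop_succ (t f : List Char) (n : Nat) :
    pvALoop t f (n+1) =
      if 0 ≤ PySem.Chars.findFrom t pvTITLE (PySem.Chars.find t pvTITLE + 1) then
        pvALoop (PySem.Chars.slice t (some (PySem.Chars.findFrom t pvTITLE (PySem.Chars.find t pvTITLE + 1))) none)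
                (PySem.Chars.slice t (some (PySem.Chars.find t pvTITLE)) (some (PySem.Chars.findFrom t pvTITLE (PySem.Chars.find t pvTITLE + 1)))) n
      else
        pvALoop (PySem.Chars.slice t (some (PySem.Chars.len t)) none)
                (PySem.Chars.slice t (some (PySem.Chars.find t pvTITLE)) none) n := rfl

lemma pvBAdvance_succ (l : List Char) (s : Int) (m : Nat) :
    pvBAdvance l s (m+1) = if s = -1 then s else pvBAdvance l (PySem.Chars.findFrom l pvTITLE (s + 1)) m := rfl

lemma pvBAdvance_neg (l : List Char) (n : Nat) : pvBAdvance l (-1) n = -1 := by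
  cases n with
  | zero => rfl
  | succ m => rw [pvBAdvance_succ, if_pos rfl]

lemma pvALoop_nil (f : List Char) (n : Nat) : pvALoop [] f (n+1) = [] := by
  induction n generalizing f with
  | zero => rfl
  | succ m ih =>
    have h : pvALoop ([] : List Char) f (m+2) = pvALoop [] [] (m+1) := rfl
    rw [h]; exact ih []

lemma pvALoop_irrel (t f g : List Char) (n : Nat) : pvALoop t f (n+1) = pvALoop t g (n+1) := rfl

lemma pvBTail_neg (l : List Char) : pvBTail l (-1) = [] := by
  unfold pvBTail; rw [if_pos rfl]

lemma pv_slice_len (l : List Char) : PySem.Chars.slice l (some (PySem.Chars.len l)) none = [] := by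
  rw [PySem.Chars.slice_eq_listSlice, PySem.Chars.len_eq, PySem.List.slice_from_natCast]
  simp

lemma pv_find_of_prefix {l : List Char} (h : pvTITLE <+: l) : PySem.Chars.find l pvTITLE = 0 := by
  have h0 : 0 ≤ PySem.Chars.find l pvTITLE := (PySem.Chars.find_nonneg_iff l pvTITLE).2 h.isInfix
  obtain ⟨-, hmin⟩ := PySem.Chars.find_spec h0
  by_contra hne
  have hpos : 0 < (PySem.Chars.find l pvTITLE).toNat := by omega
  exact hmin 0 hpos (by simpa using h)

lemma pvStep (l : List Char) (q : Nat) (hq : q ≤ l.length)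
    (hne : PySem.Chars.findFrom l pvTITLE (q:Int) ≠ -1) :
    ∃ p : Nat, PySem.Chars.findFrom l pvTITLE (q:Int) = (p:Int) ∧ q ≤ p ∧ p + 5 ≤ l.length ∧
      pvTITLE <+: l.drop p ∧
      ((PySem.Chars.findFrom l pvTITLE ((p+1 : Nat):Int) = -1 ∧
          ∀ f n, pvALoop (l.drop q) f (n+1) = pvALoop [] (l.drop p) n) ∨
       (∃ t : Nat, PySem.Chars.findFrom l pvTITLE ((p+1 : Nat):Int) = (t:Int) ∧ p + 1 ≤ t ∧ t ≤ l.length ∧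
          pvTITLE <+: l.drop t ∧
          ∀ f n, pvALoop (l.drop q) f (n+1) = pvALoop (l.drop t) (List.take (t - p) (l.drop p)) n)) := by
  obtain ⟨hqs, hpre, -⟩ := PySem.Chars.findFrom_natCast_spec l pvTITLE q hq hne
  have hs0 : (0:Int) ≤ PySem.Chars.findFrom l pvTITLE (q:Int) := le_trans (Int.natCast_nonneg q) hqs
  obtain ⟨p, hp⟩ : ∃ p : Nat, PySem.Chars.findFrom l pvTITLE (q:Int) = (p:Int) :=
    ⟨_, (Int.toNat_of_nonneg hs0).symm⟩
  rw [hp] at hqs hpre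
  rw [Int.toNat_natCast] at hpre
  have hqp : q ≤ p := by exact_mod_cast hqs
  have hp5 : p + 5 ≤ l.length := by
    have h1 := hpre.length_le
    have h2 : pvTITLE.length = 5 := by decide
    rw [List.length_drop] at h1
    omega
  have hfind : PySem.Chars.find (l.drop q) pvTITLE = ((p - q : Nat) : Int) := by
    have hnc := PySem.Chars.findFrom_natCast l pvTITLE q hq
    by_cases hc : PySem.Chars.find (l.drop q) pvTITLE = -1
    · rw [if_pos hc] at hnc
      rw [hnc] at hp
      omega
    · rw [if_neg hc] at hnc
      rw [hp] at hnc
      omega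
  have hcast1 : ((p - q : Nat) : Int) + 1 = ((p - q + 1 : Nat) : Int) := by push_cast; ring
  have hq1 : p - q + 1 ≤ (l.drop q).length := by rw [List.length_drop]; omega
  have hdd : List.drop (p - q + 1) (List.drop q l) = List.drop (p+1) l := by
    rw [List.drop_drop]; congr 1; omega
  have hstop := PySem.Chars.findFrom_natCast (l.drop q) pvTITLE (p - q + 1) hq1
  rw [hdd] at hstop
  have hFp1 := PySem.Chars.findFrom_natCast l pvTITLE (p+1) (by omega)
  have hloop : ∀ f n, pvALoop (l.drop q) f (n+1) =
      if 0 ≤ PySem.Chars.findFrom (l.drop q) pvTITLE (((p - q + 1 : Nat)) : Int) then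
        pvALoop (PySem.Chars.slice (l.drop q) (some (PySem.Chars.findFrom (l.drop q) pvTITLE ((p - q + 1 : Nat) : Int))) none)
                (PySem.Chars.slice (l.drop q) (some ((p - q : Nat) : Int)) (some (PySem.Chars.findFrom (l.drop q) pvTITLE ((p - q + 1 : Nat) : Int)))) n
      else
        pvALoop (PySem.Chars.slice (l.drop q) (some (PySem.Chars.len (l.drop q))) none)
                (PySem.Chars.slice (l.drop q) (some ((p - q : Nat) : Int)) none) n := by
    intro f n
    rw [pvALoop_succ, hfind, hcast1]
  refine ⟨p, hp, hqp, hp5, hpre, ?_⟩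
  by_cases hc2 : PySem.Chars.find (l.drop (p+1)) pvTITLE = -1
  · left
    rw [if_pos hc2] at hstop hFp1
    refine ⟨hFp1, ?_⟩
    intro f n
    rw [hloop f n, hstop, if_neg (by norm_num), pv_slice_len]
    have e2 : PySem.Chars.slice (l.drop q) (some ((p - q : Nat):Int)) none = l.drop p := by
      rw [PySem.Chars.slice_eq_listSlice, PySem.List.slice_from_natCast, List.drop_drop,
          show q + (p - q) = p from by omega]
    rw [e2]
  · right
    have hc2' : 0 ≤ PySem.Chars.find (l.drop (p+1)) pvTITLE := by
      have := PySem.Chars.neg_one_le_find (l.drop (p+1)) pvTITLE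
      omega
    obtain ⟨d, hd⟩ : ∃ d : Nat, PySem.Chars.find (l.drop (p+1)) pvTITLE = (d:Int) :=
      ⟨_, (Int.toNat_of_nonneg hc2').symm⟩
    rw [if_neg hc2, hd] at hstop hFp1
    have hFt : PySem.Chars.findFrom l pvTITLE ((p+1 : Nat):Int) = ((p+1+d : Nat):Int) := by
      rw [hFp1]; push_cast; ring
    have hstop' : PySem.Chars.findFrom (l.drop q) pvTITLE ((p - q + 1 : Nat):Int) = ((p - q + 1 + d : Nat) : Int) := by
      rw [hstop]; push_cast; ring
    have hne1 : PySem.Chars.findFrom l pvTITLE ((p+1:Nat):Int) ≠ -1 := by rw [hFt]; omega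
    obtain ⟨-, hpre2, -⟩ := PySem.Chars.findFrom_natCast_spec l pvTITLE (p+1) (by omega) hne1
    rw [hFt, Int.toNat_natCast] at hpre2
    have ht5 : (p+1+d) + 5 ≤ l.length := by
      have h1 := hpre2.length_le
      have h2 : pvTITLE.length = 5 := by decide
      rw [List.length_drop] at h1
      omega
    refine ⟨p+1+d, hFt, by omega, by omega, hpre2, ?_⟩
    intro f n
    rw [hloop f n, hstop', if_pos (Int.natCast_nonneg _)]
    have e1 : PySem.Chars.slice (l.drop q) (some ((p - q + 1 + d : Nat):Int)) none = l.drop (p+1+d) := by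
      rw [PySem.Chars.slice_eq_listSlice, PySem.List.slice_from_natCast, List.drop_drop,
          show q + (p - q + 1 + d) = p+1+d from by omega]
    have e2 : PySem.Chars.slice (l.drop q) (some ((p - q : Nat):Int)) (some ((p - q + 1 + d : Nat):Int)) = List.take (p+1+d - p) (l.drop p) := by
      rw [PySem.Chars.slice_eq_listSlice, PySem.List.slice_natCast, List.drop_drop,
          show q + (p - q) = p from by omega, show p - q + 1 + d - (p - q) = p+1+d - p from by omega]
    rw [e1, e2]

lemma pvMain (n : Nat) : ∀ (l : List Char) (q : Nat), q ≤ l.length →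
    PySem.Chars.findFrom l pvTITLE (q:Int) ≠ -1 →
    pvALoop (l.drop q) [] (n+1) = pvBTail l (pvBAdvance l (PySem.Chars.findFrom l pvTITLE (q:Int)) n) := by
  induction n with
  | zero =>
    intro l q hq hne
    obtain ⟨p, hp, hqp, hp5, hpre, hcase⟩ := pvStep l q hq hne
    rw [hp]
    have hb0 : pvBAdvance l ((p:Nat):Int) 0 = (p:Int) := rfl
    rw [hb0]
    rcases hcase with ⟨hF, hloop⟩ | ⟨t, hFt, hpt, htl, hpret, hloop⟩
    · rw [hloop [] 0]
      show l.drop p = pvBTail l (p:Int)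
      unfold pvBTail
      rw [if_neg (by omega), show ((p:Int) + 1) = ((p+1 : Nat) : Int) from by push_cast; ring, hF,
          if_neg (by simp)]
      rw [PySem.Chars.slice_eq_listSlice, PySem.List.slice_from_natCast]
    · rw [hloop [] 0]
      show List.take (t - p) (l.drop p) = pvBTail l (p:Int)
      unfold pvBTail
      rw [if_neg (by omega), show ((p:Int) + 1) = ((p+1 : Nat) : Int) from by push_cast; ring, hFt,
          if_pos (by omega)]
      rw [PySem.Chars.slice_eq_listSlice, PySem.List.slice_natCast]
  | succ m ih =>
    intro l q hq hne
    obtain ⟨p, hp, hqp, hp5, hpre, hcase⟩ := pvStep l q hq hne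
    rw [hp, pvBAdvance_succ, if_neg (by omega),
        show ((p:Int) + 1) = ((p+1 : Nat) : Int) from by push_cast; ring]
    rcases hcase with ⟨hF, hloop⟩ | ⟨t, hFt, hpt, htl, hpret, hloop⟩
    · rw [hloop [] (m+1), hF, pvBAdvance_neg, pvALoop_nil, pvBTail_neg]
    · rw [hloop [] (m+1), hFt, pvALoop_irrel (l.drop t) (List.take (t - p) (l.drop p)) [] m]
      have hFtt : PySem.Chars.findFrom l pvTITLE ((t:Nat):Int) = (t:Int) := by
        rw [PySem.Chars.findFrom_natCast l pvTITLE t htl, pv_find_of_prefix hpret,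
            if_neg (by norm_num)]
        ring
      rw [← hFtt]
      exact ih l t htl (by rw [hFtt]; omega)

-- ===== VERDICT (by name: the statement is the Claim_ definition above) =====
theorem get_concept_by_number_spec : Claim_unchanged_get_concept_by_number := by
  unfold Claim_unchanged_get_concept_by_number
  intro text cn hdom hpre
  unfold Spec_get_concept_by_number
  intro hnd
  unfold D_get_concept_by_number at hnd
  unfold Pre_get_concept_by_number at hpre
  rw [pv_alt_eq]
  unfold get_concept_by_number
  set l := text.toList with hl
  have hm : cn.toNat = (cn - 1).toNat + 1 := by omega
  rw [hm]
  by_cases hfind : PySem.Chars.find l pvTITLE = -1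
  · rw [hfind, pvBAdvance_neg, pvBTail_neg]
    by_cases hl0 : l = []
    · rw [hl0, pvALoop_nil]
    · have hIn : PySem.Str.isIn "TITLE" text = false := by
        cases h : PySem.Str.isIn "TITLE" text with
        | false => rfl
        | true =>
          have hinf := (PySem.Str.isIn_iff_infix "TITLE" text).1 h
          rw [← hl] at hinf
          rw [PySem.Chars.find_eq_neg_one_iff] at hfind
          exact absurd hinf hfind
      have htne : text ≠ "" := fun h => hl0 (by rw [hl, h]; rfl)
      have hcn : cn ≠ 1 := fun h => hnd ⟨h, htne, hIn⟩
      obtain ⟨m', hm'⟩ : ∃ m', (cn - 1).toNat = m' + 1 := ⟨(cn - 1).toNat - 1, by omega⟩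
      rw [hm', pvALoop_succ, hfind, show ((-1:Int) + 1) = 0 from by norm_num,
          PySem.Chars.findFrom_zero, hfind, if_neg (by norm_num), pv_slice_len, pvALoop_nil]
  · have hne0 : PySem.Chars.findFrom l pvTITLE ((0:Nat):Int) ≠ -1 := by
      rw [Nat.cast_zero, PySem.Chars.findFrom_zero]; exact hfind
    have hmain := pvMain (cn - 1).toNat l 0 (Nat.zero_le _) hne0
    rw [List.drop_zero, Nat.cast_zero, PySem.Chars.findFrom_zero] at hmain
    rw [hmain]

theorem get_concept_by_number_changed : Claim_changed_get_concept_by_number := by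
  unfold Claim_changed_get_concept_by_number; decide

theorem get_concept_by_number_tight : Claim_exact_get_concept_by_number := by
  unfold Claim_exact_get_concept_by_number
  intro text cn hdom hpre hd
  unfold D_get_concept_by_number at hd
  obtain ⟨hcn, htne, hIn⟩ := hd
  set l := text.toList with hl
  have hl0 : l ≠ [] := fun h => htne (String.toList_eq_nil_iff.1 (hl ▸ h))
  have hninf : ¬ (pvTITLE <:+: l) := by
    intro h
    have := (PySem.Str.isIn_iff_infix "TITLE" text).2 (by rw [← hl]; exact h)
    rw [hIn] at this
    exact Bool.false_ne_true this
  have hfind : PySem.Chars.find l pvTITLE = -1 := (PySem.Chars.find_eq_neg_one_iff l pvTITLE).2 hninf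
  subst hcn
  have hA : get_concept_by_number text 1 = String.ofList (List.drop (l.length - 1) l) := by
    unfold get_concept_by_number
    rw [← hl, show ((1:Int)).toNat = 1 from rfl, pvALoop_succ, hfind,
        show ((-1:Int) + 1) = 0 from by norm_num, PySem.Chars.findFrom_zero, hfind,
        if_neg (by norm_num)]
    show String.ofList (PySem.Chars.slice l (some (-1)) none) = _
    rw [PySem.Chars.slice_eq_listSlice, PySem.List.slice_from_neg_one]
  have hB : get_concept_by_number_alt text 1 = "" := by
    rw [pv_alt_eq, ← hl, show ((1:Int) - 1).toNat = 0 from rfl, hfind]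
    have h0 : pvBAdvance l (-1) 0 = -1 := rfl
    rw [h0, pvBTail_neg]
  rw [hA, hB]
  intro h
  have h2 : List.drop (l.length - 1) l = [] := by
    have := congrArg String.toList h
    simpa using this
  rw [List.drop_eq_nil_iff] at h2
  have h5 : l.length ≠ 0 := fun hz => hl0 (List.eq_nil_of_length_eq_zero hz)
  omega
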